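-- pv_equiv track=rewrite | github.com/sebadp/nexton | app/dspy_modules/scorer.py | _score_company
-- ===== SOURCE A (Python) =====
-- def _score_company(company: str) -> int:
--     """Score company attractiveness (0-10)."""
--     # Simple heuristic - can be enhanced with company database
--     well_known = [
--         "google",
--         "microsoft",
--         "amazon",
--         "apple",
--         "meta",
--         "netflix",
--         "uber",
--         "airbnb",
--         "stripe",
--         "spotify",
--         "mercadolibre",
--         "mercadolibre",
--         "globant",
--         "auth0",
--     ]
--
--     company_lower = company.lower()
--     for known in well_known:
--         if known in company_lower:
--             return 10
--
--     # Unknown company gets neutral score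
--     return 5
-- ===== SOURCE B (Python) =====
-- _WELL_KNOWN = frozenset(
--     "auth0 globant mercadolibre spotify stripe airbnb uber "
--     "netflix meta apple amazon microsoft google".split()
-- )
-- _LENGTHS = sorted({len(n) for n in _WELL_KNOWN})
--
--
-- def _score_company(company: str) -> int:
--     """Score company attractiveness (0-10)."""
--     cl = company.lower()
--     for i in range(len(cl)):
--         for L in _LENGTHS:
--             if cl[i:i+L] in _WELL_KNOWN:
--                 return 10
--     return 5
-- ===== Notes on version B (the rewrite author's own statement) =====
-- stated objective: alternative
-- what changed: A loops over the word list and runs a substring scan per word; B slides over positions of the lowercased name and looks each fixed-length window up in a precomputed frozenset of names keyed by the set of name lengths.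
import Mathlib
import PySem

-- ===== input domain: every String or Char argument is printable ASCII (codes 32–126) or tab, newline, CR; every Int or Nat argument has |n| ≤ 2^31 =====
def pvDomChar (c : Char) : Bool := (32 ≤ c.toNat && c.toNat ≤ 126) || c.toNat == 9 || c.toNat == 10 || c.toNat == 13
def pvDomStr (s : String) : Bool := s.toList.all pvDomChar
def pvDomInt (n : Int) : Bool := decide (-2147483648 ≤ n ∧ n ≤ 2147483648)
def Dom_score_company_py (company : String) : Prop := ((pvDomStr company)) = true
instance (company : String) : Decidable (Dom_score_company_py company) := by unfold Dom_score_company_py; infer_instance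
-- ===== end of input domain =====

-- B replaces A's word-outer loop of substring scans by a position-outer sliding-window scan
-- with a frozenset lookup of each candidate window (alternative decomposition; same cost class).


-- ===== PORT A =====
def pvWellKnown : List String :=
  ["google", "microsoft", "amazon", "apple", "meta", "netflix", "uber",
   "airbnb", "stripe", "spotify", "mercadolibre", "mercadolibre", "globant", "auth0"]

-- the 'for known in well_known: if known in company_lower: return 10' loop, early return as recursion
def pvLoopA : List String → String → Int
  | [], _ => 5
  | k :: rest, cl => if PySem.Str.isIn k cl then 10 else pvLoopA rest cl

def score_company_py (company : String) : Int :=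
  pvLoopA pvWellKnown (PySem.Str.lower company)

-- ===== PORT B =====
-- B's module constants: the frozenset of names and sorted({len(n) for n in _WELL_KNOWN})
def pvNameSet : PySem.Set String := PySem.Set.ofList pvWellKnown

def pvLengths : List Int :=
  PySem.List.sorted (PySem.Set.ofList (pvNameSet.map (fun n => (PySem.Str.len n : Int)))) (fun x => x) false

-- outer 'for i in range(len(cl))' with early return, as recursion over the index list;
-- the inner 'for L in _LENGTHS: if cl[i:i+L] in _WELL_KNOWN: return 10' is the 'any'
def pvLoopB : List Int → String → Int
  | [], _ => 5
  | i :: rest, cl =>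
    if pvLengths.any (fun L => pvNameSet.contains (PySem.Str.slice cl (some i) (some (i + L)))) then 10
    else pvLoopB rest cl

def score_company_py_alt (company : String) : Int :=
  let cl := PySem.Str.lower company
  pvLoopB (PySem.List.pyRange 0 (PySem.Str.len cl) 1) cl

-- ===== PRECONDITION & SPEC =====
def Spec_score_company_py (company : String) (out : Int) : Prop := out = score_company_py_alt company
instance (company : String) (out : Int) : Decidable (Spec_score_company_py company out) := by unfold Spec_score_company_py; infer_instance

-- ===== CLAIM (what is proved, stated in full; the proofs are below) =====
def Claim_equal_score_company_py : Prop := ∀ (company : String), Dom_score_company_py company → Spec_score_company_py company (score_company_py company)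

-- ===== LEMMAS AND PROOFS =====
theorem pvLoopA_eq_any (l : List String) (cl : String) :
    pvLoopA l cl = if l.any (fun k => PySem.Str.isIn k cl) then 10 else 5 := by
  induction l with
  | nil => simp [pvLoopA]
  | cons k rest ih =>
    simp only [pvLoopA, ih, List.any_cons, Bool.or_eq_true]
    split_ifs <;> tauto

theorem pvLoopB_eq_any (l : List Int) (cl : String) :
    pvLoopB l cl = if l.any (fun i => pvLengths.any
        (fun L => pvNameSet.contains (PySem.Str.slice cl (some i) (some (i + L))))) then 10 else 5 := by
  induction l with
  | nil => simp [pvLoopB]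
  | cons i rest ih =>
    simp only [pvLoopB, ih, List.any_cons, Bool.or_eq_true]
    split_ifs <;> tauto

theorem pvLengths_eq : pvLengths = [4, 5, 6, 7, 9, 12] := by decide

theorem pvName_len_mem : ∀ n ∈ pvWellKnown, (PySem.Str.len n : Int) ∈ pvLengths := by decide

theorem pvName_ne_nil : ∀ n ∈ pvWellKnown, n.toList ≠ [] := by decide

theorem pvNameSet_mem (s : String) : pvNameSet.contains s = true ↔ s ∈ pvWellKnown := by
  constructor
  · intro h
    have := List.mem_of_elem_eq_true h
    simpa [pvNameSet, PySem.Set.mem_ofList] using this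
  · intro h
    exact List.elem_eq_true_of_mem (by simpa [pvNameSet, PySem.Set.mem_ofList] using h)

-- the key equivalence: some known name occurs in cl ↔ some window of a known length equals a known name
theorem pv_any_iff (cl : String) :
    (pvWellKnown.any (fun k => PySem.Str.isIn k cl) = true) ↔
    ((PySem.List.pyRange 0 (PySem.Str.len cl) 1).any (fun i => pvLengths.any
        (fun L => pvNameSet.contains (PySem.Str.slice cl (some i) (some (i + L))))) = true) := by
  simp only [List.any_eq_true]
  constructor
  · rintro ⟨k, hk, hin⟩
    have hinf : k.toList <:+: cl.toList := (PySem.Str.isIn_iff_infix _ _).1 hin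
    obtain ⟨s, t, hst⟩ := hinf
    have hkne : k.toList ≠ [] := pvName_ne_nil k hk
    have hlenk : PySem.Str.len k = (k.toList.length : Int) := by simp
    refine ⟨(s.length : Int), ?_, ((k.toList.length : Nat) : Int), by rw [← hlenk]; exact pvName_len_mem k hk, ?_⟩
    · rw [PySem.List.mem_pyRange_one]
      constructor
      · exact_mod_cast Nat.zero_le _
      · have : s.length < cl.toList.length := by
          rw [← hst]
          simp only [List.length_append]
          have := List.length_pos_iff.2 hkne
          omega
        simpa [PySem.Str.len_eq] using (by exact_mod_cast this : (s.length : Int) < (cl.toList.length : Int))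
    · rw [pvNameSet_mem]
      have hslice : (PySem.Str.slice cl (some (s.length : Int))
          (some ((s.length : Int) + ((k.toList.length : Nat) : Int)))) = k := by
        have h1 : (PySem.Str.slice cl (some (s.length : Int))
            (some ((s.length : Int) + ((k.toList.length : Nat) : Int)))).toList
            = (cl.toList.drop s.length).take k.toList.length := by
          rw [PySem.Str.toList_slice, PySem.Chars.slice_eq_listSlice, PySem.List.slice_natCast_add]
        have h2 : (cl.toList.drop s.length).take k.toList.length = k.toList := by
          rw [← hst, List.append_assoc, List.drop_left, List.take_left]
        exact String.toList_injective (h1.trans h2)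
      rw [hslice]; exact hk
  · rintro ⟨i, hi, L, hL, hmem⟩
    rw [PySem.List.mem_pyRange_one] at hi
    have hLpos : 0 ≤ L := by rw [pvLengths_eq] at hL; fin_cases hL <;> norm_num
    set w := PySem.Str.slice cl (some i) (some (i + L)) with hw
    have hwmem : w ∈ pvWellKnown := (pvNameSet_mem w).1 hmem
    refine ⟨w, hwmem, ?_⟩
    rw [PySem.Str.isIn_iff_infix]
    have h1 : w.toList = (cl.toList.drop i.toNat).take L.toNat := by
      have hi0 : 0 ≤ i := hi.1
      have : i + L = ((i.toNat : Int) + (L.toNat : Int)) := by omega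
      rw [hw, PySem.Str.toList_slice, this]
      have hic : i = ((i.toNat : Int)) := by omega
      rw [hic]
      exact_mod_cast PySem.List.slice_natCast_add cl.toList i.toNat L.toNat
    rw [h1]
    exact ((cl.toList.drop i.toNat).take_prefix L.toNat).isInfix.trans
      (cl.toList.drop_suffix i.toNat).isInfix

-- ===== VERDICT (by name: the statement is the Claim_ definition above) =====
theorem score_company_py_spec : Claim_equal_score_company_py := by
  intro company _
  unfold Spec_score_company_py score_company_py score_company_py_alt
  rw [pvLoopA_eq_any, pvLoopB_eq_any]
  by_cases h : pvWellKnown.any (fun k => PySem.Str.isIn k (PySem.Str.lower company)) = true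
  · rw [if_pos h, if_pos ((pv_any_iff _).1 h)]
  · rw [if_neg h, if_neg (fun hc => h ((pv_any_iff _).2 hc))]
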